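-- pv_equiv track=rewrite | github.com/hanish3464/WORD-pytorch | object_detection/cut_utils.py | sortCut
-- ===== SOURCE A (Python) =====
-- def sortCut(dets):
--     tmp = []; value = []; dets_cut = []
--     for idx, det in enumerate(dets):
--         ymin = int(det[1])
--         value.append(ymin)
--         tmp.append(det)
--     order_k = sorted(range(len(value)), key=lambda k: value[k])
--     for cut_order in order_k:
--         bbox = tmp[cut_order]
--         xmin, ymin, xmax, ymax = int(bbox[0]), int(bbox[1]), int(bbox[2]), int(bbox[3])
--         dets_cut.append([xmin,ymin,xmax,ymax])
--     return dets_cut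
-- ===== SOURCE B (Python) =====
-- def sortCut(dets):
--     def ins(box, acc):
--         # insert box before the first entry with a strictly larger ymin (stable)
--         if not acc or box[1] < acc[0][1]:
--             return [box] + acc
--         return [acc[0]] + ins(box, acc[1:])
--     out = []
--     for det in dets:
--         out = ins([int(det[0]), int(det[1]), int(det[2]), int(det[3])], out)
--     return out
-- ===== Notes on version B (the rewrite author's own statement) =====
-- stated objective: alternative
-- what changed: Replaces A's argsort (sorted index list keyed by a parallel ymin list, then re-indexing into a tmp copy) with an online stable insertion sort: each box is converted to its int 4-list and recursively inserted before the first stored box with a strictly larger ymin; no index array, value list or tmp copy exists.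
import Mathlib
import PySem

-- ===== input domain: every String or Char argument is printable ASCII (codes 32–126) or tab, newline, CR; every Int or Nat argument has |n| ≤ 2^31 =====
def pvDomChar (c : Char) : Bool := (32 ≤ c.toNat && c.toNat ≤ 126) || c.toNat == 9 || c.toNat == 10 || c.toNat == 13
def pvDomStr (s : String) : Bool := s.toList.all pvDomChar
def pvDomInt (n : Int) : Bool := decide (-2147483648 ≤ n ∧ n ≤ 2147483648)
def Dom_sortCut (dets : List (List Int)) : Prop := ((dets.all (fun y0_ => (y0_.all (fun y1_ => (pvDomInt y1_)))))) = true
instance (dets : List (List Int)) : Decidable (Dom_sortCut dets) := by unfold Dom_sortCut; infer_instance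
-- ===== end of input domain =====

-- B replaces A's argsort (index list sorted by a parallel ymin list, then re-indexing a
-- tmp copy) with an online stable insertion sort of the converted boxes (same result).

-- ===== PORT A =====
-- first loop: value.append(int(det[1])); tmp.append(det)
def sortCut (dets : List (List Int)) : List (List Int) :=
  let value : List Int :=
    (PySem.List.enumerate dets 0).foldl (fun acc p => acc ++ [PySem.List.pyGetD p.2 1 0]) []
  let tmp : List (List Int) :=
    (PySem.List.enumerate dets 0).foldl (fun acc p => acc ++ [p.2]) []
  let order_k : List Int :=
    PySem.List.sorted (PySem.List.pyRange 0 (value.length : Int) 1)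
      (fun k => PySem.List.pyGetD value k 0) false
  order_k.foldl (fun acc cut_order =>
    let bbox := PySem.List.pyGetD tmp cut_order []
    acc ++ [[PySem.List.pyGetD bbox 0 0, PySem.List.pyGetD bbox 1 0,
             PySem.List.pyGetD bbox 2 0, PySem.List.pyGetD bbox 3 0]]) []

-- ===== PORT B =====
-- ins(box, acc): insert box before the first entry with strictly larger ymin (stable)
def insBox (box : List Int) (acc : List (List Int)) : List (List Int) :=
  match acc with
  | [] => [box]
  | y :: t =>
      if PySem.List.pyGetD box 1 0 < PySem.List.pyGetD y 1 0 then box :: y :: t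
      else y :: insBox box t

def sortCut_alt (dets : List (List Int)) : List (List Int) :=
  dets.foldl (fun out det =>
    insBox [PySem.List.pyGetD det 0 0, PySem.List.pyGetD det 1 0,
            PySem.List.pyGetD det 2 0, PySem.List.pyGetD det 3 0] out) []

-- ===== PRECONDITION & SPEC =====
-- A indexes det[1] and bbox[0..3] of every box: it raises IndexError on any box with
-- fewer than 4 coordinates, so exactly those inputs are excluded.
def Pre_sortCut (dets : List (List Int)) : Prop := ∀ det ∈ dets, 4 ≤ det.length
instance (dets : List (List Int)) : Decidable (Pre_sortCut dets) := by unfold Pre_sortCut; infer_instance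

def pvWitness_sortCut : List (List Int) := [[3, 9, 5, 11], [0, 2, 4, 6], [1, 2, 2, 3]]

def Spec_sortCut (dets : List (List Int)) (out : List (List Int)) : Prop := out = sortCut_alt dets
instance (dets : List (List Int)) (out : List (List Int)) : Decidable (Spec_sortCut dets out) := by unfold Spec_sortCut; infer_instance

-- ===== CLAIM (what is proved, stated in full; the proofs are below) =====
def Claim_equal_sortCut : Prop := ∀ (dets : List (List Int)), Dom_sortCut dets → Pre_sortCut dets → Spec_sortCut dets (sortCut dets)

-- ===== LEMMAS AND PROOFS =====

def toBox (d : List Int) : List Int :=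
  [PySem.List.pyGetD d 0 0, PySem.List.pyGetD d 1 0,
   PySem.List.pyGetD d 2 0, PySem.List.pyGetD d 3 0]

-- insBox is exactly insertBy with the strictly-larger-ymin predicate
theorem insBox_eq_insertBy (box : List Int) (acc : List (List Int)) :
    insBox box acc = PySem.List.insertBy
      (fun a b => decide (PySem.List.pyGetD a 1 0 < PySem.List.pyGetD b 1 0)) box acc := by
  induction acc with
  | nil => rfl
  | cons y t ih => simp [insBox, PySem.List.insertBy]; split_ifs <;> simp [ih]

-- B is the stable sort of the converted boxes by ymin
theorem alt_eq_sorted (dets : List (List Int)) :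
    sortCut_alt dets
      = PySem.List.sorted (dets.map toBox) (fun d => PySem.List.pyGetD d 1 0) false := by
  rw [PySem.List.sorted_eq_foldl_insertBy, List.foldl_map]
  unfold sortCut_alt
  congr 1
  funext out det
  exact insBox_eq_insertBy _ _

-- mapping commutes with insertBy when the comparison factors through the map
theorem map_insertBy {α β : Type} (f : α → β) (q : β → β → Bool) (x : α) (ys : List α) :
    (PySem.List.insertBy (fun a b => q (f a) (f b)) x ys).map f
      = PySem.List.insertBy q (f x) (ys.map f) := by
  induction ys with
  | nil => rfl
  | cons y t ih => simp [PySem.List.insertBy]; split_ifs <;> simp [ih]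

-- a stable sort of (xs.map f) by key is the map of the stable sort of xs by key ∘ f
theorem sorted_map {α β : Type} {κ : Type} [LinearOrder κ]
    (f : α → β) (key : β → κ) (xs : List α) :
    PySem.List.sorted (xs.map f) key false
      = (PySem.List.sorted xs (fun a => key (f a)) false).map f := by
  rw [PySem.List.sorted_eq_foldl_insertBy, PySem.List.sorted_eq_foldl_insertBy]
  induction xs using List.reverseRecOn with
  | nil => rfl
  | append_singleton t x ih =>
      simp only [List.map_append, List.foldl_append, List.foldl_cons, List.foldl_nil, ih]
      exact (map_insertBy f _ x _).symm

-- A is the same map of the same stable sort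
theorem a_eq_sorted (dets : List (List Int)) :
    sortCut dets = (PySem.List.sorted dets (fun d => PySem.List.pyGetD d 1 0) false).map toBox := by
  unfold sortCut
  simp only [PySem.List.foldl_append_singleton_eq_map]
  have hval : (PySem.List.enumerate dets 0).map (fun p => PySem.List.pyGetD p.2 1 0)
      = dets.map (fun d => PySem.List.pyGetD d 1 0) := by
    conv_rhs => rw [← PySem.List.map_snd_enumerate dets 0]
    rw [List.map_map]; rfl
  have htmp : (PySem.List.enumerate dets 0).map (fun p => p.2) = dets :=
    PySem.List.map_snd_enumerate dets 0
  rw [hval, htmp]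
  simp only [List.nil_append, List.length_map]
  have hkey : (fun k => PySem.List.pyGetD (dets.map (fun d => PySem.List.pyGetD d 1 0)) k 0)
      = fun k => PySem.List.pyGetD (PySem.List.pyGetD dets k []) 1 0 := by
    funext k
    exact PySem.List.pyGetD_map (fun d => PySem.List.pyGetD d 1 0) dets k []
  rw [hkey]
  have hcomp : (fun x : Int =>
      [PySem.List.pyGetD (PySem.List.pyGetD dets x []) 0 0, PySem.List.pyGetD (PySem.List.pyGetD dets x []) 1 0,
       PySem.List.pyGetD (PySem.List.pyGetD dets x []) 2 0, PySem.List.pyGetD (PySem.List.pyGetD dets x []) 3 0])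
      = toBox ∘ (fun k => PySem.List.pyGetD dets k []) := rfl
  rw [hcomp, ← List.map_map]
  rw [← sorted_map (fun k => PySem.List.pyGetD dets k []) (fun d => PySem.List.pyGetD d 1 0)
        (PySem.List.pyRange 0 (dets.length : Int) 1)]
  rw [PySem.List.map_pyGetD_pyRange_zero' dets ([] : List Int)]

-- ===== VERDICT =====
theorem sortCut_spec : Claim_equal_sortCut := by
  intro dets _ _
  unfold Spec_sortCut
  rw [a_eq_sorted, alt_eq_sorted,
      sorted_map toBox (fun d => PySem.List.pyGetD d 1 0) dets]
  have : (fun a => PySem.List.pyGetD (toBox a) 1 0) = fun d => PySem.List.pyGetD d 1 0 := by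
    funext d; rfl
  rw [this]
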